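-- pv_equiv track=rewrite | github.com/ausgerechnet/cwb-vrt | vrt/bio.py | repair_bio
-- ===== SOURCE A (Python) =====
-- def repair_bio(vrt, col=7, sep="\t", s='ner'):
--     """make sure that (potentially invalid) BIOES encoding complies to
--     simple BIO schema
--
--     background: some predictors of s-attributes return BIOES encoding,
--     where tags are predicted on a token-level. this BIOES is usually
--     not valid, i.e. an I-{tag} might follow O, etc.
--
--     see also Palen-Michel et al. 2021:
--     - https://arxiv.org/pdf/2107.14154.pdf
--     - https://github.com/bltlab/seqscore/
--
--     we ensure valid BIO by the following rules:
--
--     transform to BIO: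
--     - S-{tag} → B-{tag}
--     - E-{tag} → I-{tag}
--
--     repair BIO:
--     - O → I-{tag}: O → B-{tag}
--     - B-{tag1} → I-{tag2}: B-{tag1} → B-{tag2}
--     - I-{tag1} → I-{tag2}: I-{tag1} → B-{tag2}
--
--     the repaired column replaces the original column.
--
--     additionally, BIO encoding will be transformed to s-attribute
--     <{s} type={tag}> (if there is already an s-att with the same name in
--     the input, the input will be ignored)
--
--     note that we assume that any additional s-attributes stored in vrt
--     break BIO encoding.
--
--     :param iterable vrt: vrt-lines
--     :param int col: column of each line that contains encoding
--     :param str sep: separator for columns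
--     :param str s: s-attribute to store BIO encoding
--
--     """
--
--     lines = list()
--     prev_state, prev_tag = "O", None
--
--     for line in vrt:
--         line = line.strip()     # just in case
--
--         # ignore s-attribute lines that are named like the new s-attribute
--         if line.startswith(f"<{s} ") or line.startswith(f"<{s}>") or line.startswith(f"</{s}"):
--             continue
--
--         # all other s-attributes (s, text) break BIO
--         elif line.startswith("<"):
--             if prev_state != "O":
--                 lines.append(f"</{s}>")
--             lines.append(line)
--             prev_state, prev_tag = "O", None
--
--         # p-attribute lines
--         else:
--             line = line.split("\t")
--             enc = line[col]
--             if enc == "O":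
--                 state, tag = "O", None
--                 if prev_state != "O":
--                     lines.append(f"</{s}>")
--             else:
--                 state, tag = enc.split("-")
--                 # transform to BIO
--                 if state == "S":
--                     state = "B"
--                 if state == "E":
--                     state = "I"
--                 # repair BIO
--                 if prev_state == "O" and state == "I":
--                     state = "B"
--                 if (prev_state == "B" or prev_state == "I") and state == "I" and prev_tag != tag:
--                     state = "B"
--                 line[col] = "-".join([state, tag])
--             if state == "B":
--                 if prev_state != "O":
--                     lines.append(f"</{s}>")
--                 lines.append(f'<{s} type="{tag}">')
--             lines.append("\t".join(line))
--             prev_state, prev_tag = state, tag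
--
--     return lines
-- ===== SOURCE B (Python) =====
-- def repair_bio(vrt, col=7, sep="\t", s='ner'):
--     # pass 1: classify kept lines into break / token records (BIOES -> BIO normalised)
--     recs = []
--     for raw in vrt:
--         line = raw.strip()
--         if line.startswith((f"<{s} ", f"<{s}>", f"</{s}")):
--             continue
--         if line.startswith("<"):
--             recs.append(("brk", None, None, line))
--         else:
--             cols = line.split("\t")
--             enc = cols[col]
--             if enc == "O":
--                 recs.append(("tok", "O", None, cols))
--             else:
--                 st0, tag = enc.split("-")
--                 st = "B" if st0 == "S" else ("I" if st0 == "E" else st0)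
--                 recs.append(("tok", st, tag, cols))
--     # pass 2: repair span starts (I after O/break or tag change -> B), rewrite the column
--     items = []
--     pk, pt = "O", None
--     for kind, st, tag, payload in recs:
--         if kind == "brk":
--             items.append(("O", None, payload))
--             pk, pt = "O", None
--         elif tag is None:
--             items.append(("O", None, "\t".join(payload)))
--             pk, pt = st, None
--         else:
--             if st == "I" and (pk == "O" or (pk in ("B", "I") and pt != tag)):
--                 st2 = "B"
--             else:
--                 st2 = st
--             cols = list(payload)
--             cols[col] = "-".join([st2, tag])
--             items.append((st2, tag, "\t".join(cols)))
--             pk, pt = st, tag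
--     # pass 3: emit, inserting s-attribute open/close lines
--     out = []
--     pst = "O"
--     for st, tag, text in items:
--         if st == "B":
--             if pst != "O":
--                 out.append(f"</{s}>")
--             out.append(f'<{s} type="{tag}">')
--             out.append(text)
--             pst = "B"
--         elif tag is None:
--             if pst != "O":
--                 out.append(f"</{s}>")
--             out.append(text)
--             pst = "O"
--         else:
--             out.append(text)
--             pst = st
--     return out
-- ===== Notes on version B (the rewrite author's own statement) =====
-- stated objective: alternative
-- what changed: A's single fused loop carrying (prev_state, prev_tag) is replaced by a three-pass pipeline over an explicit intermediate record list: pass 1 classifies and BIOES-normalises each kept line, pass 2 repairs span starts and rewrites the column using only the previous raw record, pass 3 emits the s-attribute open/close lines from the record kinds.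
import Mathlib
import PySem

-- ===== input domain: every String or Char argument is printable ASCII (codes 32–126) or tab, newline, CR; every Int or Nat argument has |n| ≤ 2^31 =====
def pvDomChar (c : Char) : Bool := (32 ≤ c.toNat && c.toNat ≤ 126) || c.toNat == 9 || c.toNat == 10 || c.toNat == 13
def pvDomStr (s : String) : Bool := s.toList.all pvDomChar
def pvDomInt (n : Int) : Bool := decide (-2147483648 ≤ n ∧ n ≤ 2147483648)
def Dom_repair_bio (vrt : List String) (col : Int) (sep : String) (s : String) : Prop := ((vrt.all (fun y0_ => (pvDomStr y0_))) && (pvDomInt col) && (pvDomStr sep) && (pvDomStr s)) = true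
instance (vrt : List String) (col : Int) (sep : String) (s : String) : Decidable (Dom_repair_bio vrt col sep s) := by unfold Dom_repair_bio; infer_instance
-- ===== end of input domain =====

-- B re-implements A's single fused state machine as a three-pass pipeline (classify / repair / emit)
-- over an explicit intermediate record list; equivalence of RETURN values is proved on Pre_ (the
-- inputs where A does not raise). Note: A (and B) split columns on a literal "\t"; `sep` is unused, as in A.

-- shared primitive: s.split(sep) for a non-empty sep (exact: PySem.Str.split? is none only for sep = "")
def pySplit (s sep : String) : List String := (PySem.Str.split? s sep).getD []

-- ===== PORT A =====
-- literal transliteration of A's single loop; state = (accumulated lines, prev_state, prev_tag)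
def repairBioLoop (col : Int) (s : String) : List String → List String → String → Option String → List String
  | [], lines, _, _ => lines
  | raw :: rest, lines, pst, ptag =>
    let line := PySem.Str.strip raw
    if PySem.Str.startswith line ("<" ++ s ++ " ") || PySem.Str.startswith line ("<" ++ s ++ ">")
        || PySem.Str.startswith line ("</" ++ s) then
      repairBioLoop col s rest lines pst ptag
    else if PySem.Str.startswith line "<" then
      repairBioLoop col s rest ((if pst ≠ "O" then lines ++ ["</" ++ s ++ ">"] else lines) ++ [line]) "O" none
    else
      let cols := pySplit line "\t"
      let enc := PySem.List.pyGetD cols col ""   -- line[col]; IndexError excluded by Pre_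
      if enc = "O" then
        repairBioLoop col s rest
          ((if pst ≠ "O" then lines ++ ["</" ++ s ++ ">"] else lines) ++ [PySem.Str.join "\t" cols]) "O" none
      else
        let parts := pySplit enc "-"   -- "state, tag = enc.split('-')"; ValueError (≠ 2 parts) excluded by Pre_
        let st0 := parts.getD 0 ""
        let tag := parts.getD 1 ""
        let st1 := if st0 = "S" then "B" else st0
        let st2 := if st1 = "E" then "I" else st1
        let st3 := if pst = "O" ∧ st2 = "I" then "B" else st2
        let st  := if (pst = "B" ∨ pst = "I") ∧ st3 = "I" ∧ ptag ≠ some tag then "B" else st3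
        let cols2 := PySem.List.pySetD cols col (PySem.Str.join "-" [st, tag])
        let lines2 := if st = "B" then
            (if pst ≠ "O" then lines ++ ["</" ++ s ++ ">"] else lines) ++ ["<" ++ s ++ " type=\"" ++ tag ++ "\">"]
          else lines
        repairBioLoop col s rest (lines2 ++ [PySem.Str.join "\t" cols2]) st (some tag)

def repair_bio (vrt : List String) (col : Int) (sep : String) (s : String) : List String :=
  repairBioLoop col s vrt [] "O" none

-- ===== PORT B =====
-- intermediate record of pass 1: an s-attribute break line, or a token (BIOES→BIO-normalised state, tag, columns)
inductive BioRec where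
  | brk (line : String)
  | tok (st : String) (tag : Option String) (cols : List String)
deriving DecidableEq, Repr

-- pass 1: classify each kept line (tag = none marks a plain "O" encoding)
def classifyLines (col : Int) (s : String) : List String → List BioRec
  | [] => []
  | raw :: rest =>
    let line := PySem.Str.strip raw
    if PySem.Str.startswith line ("<" ++ s ++ " ") || PySem.Str.startswith line ("<" ++ s ++ ">")
        || PySem.Str.startswith line ("</" ++ s) then
      classifyLines col s rest
    else if PySem.Str.startswith line "<" then
      .brk line :: classifyLines col s rest
    else
      let cols := pySplit line "\t"
      let enc := PySem.List.pyGetD cols col ""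
      if enc = "O" then .tok "O" none cols :: classifyLines col s rest
      else
        -- "st0, tag = enc.split('-')": a two-element unpack; Pre_ guarantees exactly two parts
        let (st0, tag) := match pySplit enc "-" with | [a, b] => (a, b) | _ => ("", "")
        let st := if st0 = "S" then "B" else if st0 = "E" then "I" else st0
        .tok st (some tag) cols :: classifyLines col s rest

-- pass 2: repair span starts (I after O/break, or after a tag change → B) and rewrite the column;
-- carries the PREVIOUS record's raw state and tag
def repairRecs (col : Int) : String → Option String → List BioRec → List (String × Option String × String)
  | _, _, [] => []
  | _, _, .brk line :: rest => ("O", none, line) :: repairRecs col "O" none rest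
  | _, _, .tok st none cols :: rest =>
    ("O", none, PySem.Str.join "\t" cols) :: repairRecs col st none rest
  | pk, pt, .tok st (some t) cols :: rest =>
    let st2 := if st = "I" ∧ (pk = "O" ∨ ((pk = "B" ∨ pk = "I") ∧ pt ≠ some t)) then "B" else st
    (st2, some t, PySem.Str.join "\t" (PySem.List.pySetD cols col (PySem.Str.join "-" [st2, t])))
      :: repairRecs col st (some t) rest

-- pass 3: emit, inserting the s-attribute open/close lines; carries only the previous emitted state
def emitRecs (s : String) : List (String × Option String × String) → List String → String → List String
  | [], out, _ => out
  | (st, tag, text) :: rest, out, pst =>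
    if st = "B" then
      emitRecs s rest ((if pst ≠ "O" then out ++ ["</" ++ s ++ ">"] else out)
        ++ ["<" ++ s ++ " type=\"" ++ tag.getD "" ++ "\">", text]) "B"
    else if tag = none then
      emitRecs s rest ((if pst ≠ "O" then out ++ ["</" ++ s ++ ">"] else out) ++ [text]) "O"
    else
      emitRecs s rest (out ++ [text]) st

def repair_bio_alt (vrt : List String) (col : Int) (sep : String) (s : String) : List String :=
  emitRecs s (repairRecs col "O" none (classifyLines col s vrt)) [] "O"

-- ===== PRECONDITION & SPEC =====
-- Pre_ excludes exactly the inputs on which the Python A raises: a kept p-attribute line whose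
-- tab-split has no element at index col (IndexError), or whose encoding is neither "O" nor a
-- string splitting on "-" into exactly two parts (ValueError on unpacking).
def Pre_repair_bio (vrt : List String) (col : Int) (sep : String) (s : String) : Prop :=
  ∀ line ∈ vrt,
    PySem.Str.startswith (PySem.Str.strip line) ("<" ++ s ++ " ") = true ∨
    PySem.Str.startswith (PySem.Str.strip line) ("<" ++ s ++ ">") = true ∨
    PySem.Str.startswith (PySem.Str.strip line) ("</" ++ s) = true ∨
    PySem.Str.startswith (PySem.Str.strip line) "<" = true ∨
    (PySem.Raise.InRange (pySplit (PySem.Str.strip line) "\t").length col ∧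
      (PySem.List.pyGetD (pySplit (PySem.Str.strip line) "\t") col "" = "O" ∨
        (pySplit (PySem.List.pyGetD (pySplit (PySem.Str.strip line) "\t") col "") "-").length = 2))
instance (vrt : List String) (col : Int) (sep : String) (s : String) : Decidable (Pre_repair_bio vrt col sep s) := by
  unfold Pre_repair_bio; infer_instance

def pvWitness_repair_bio : List String × Int × String × String :=
  (["<text>", "word\tB-per", "word\tI-per", "word\tO", "word\tS-loc"], 1, "\t", "ner")

def Spec_repair_bio (vrt : List String) (col : Int) (sep : String) (s : String) (out : List String) : Prop := out = repair_bio_alt vrt col sep s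
instance (vrt : List String) (col : Int) (sep : String) (s : String) (out : List String) : Decidable (Spec_repair_bio vrt col sep s out) := by unfold Spec_repair_bio; infer_instance

-- ===== CLAIM (what is proved, stated in full; the proofs are below) =====
def Claim_equal_repair_bio : Prop := ∀ (vrt : List String) (col : Int) (sep : String) (s : String), Dom_repair_bio vrt col sep s → Pre_repair_bio vrt col sep s → Spec_repair_bio vrt col sep s (repair_bio vrt col sep s)

-- ===== LEMMAS AND PROOFS =====

-- A's two sequential repair ifs (on the repaired previous state) compute the same state as B's
-- single combined if (on the raw previous state), given the two state correspondences.
lemma repair_state_eq (pstA pk st2 t : String) (pt : Option String)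
    (h1 : (pk = "O") ↔ (pstA = "O"))
    (h2 : (pk = "B" ∨ pk = "I") ↔ (pstA = "B" ∨ pstA = "I")) :
    (if (pstA = "B" ∨ pstA = "I") ∧ (if pstA = "O" ∧ st2 = "I" then "B" else st2) = "I" ∧ pt ≠ some t
      then "B" else (if pstA = "O" ∧ st2 = "I" then "B" else st2))
    = (if st2 = "I" ∧ (pk = "O" ∨ ((pk = "B" ∨ pk = "I") ∧ pt ≠ some t)) then "B" else st2) := by
  by_cases hI : st2 = "I"
  · by_cases hO : pstA = "O"
    · have hkO : pk = "O" := h1.mpr hO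
      simp [hI, hO, hkO]
    · have hkO : ¬ pk = "O" := fun h => hO (h1.mp h)
      by_cases hBI : pstA = "B" ∨ pstA = "I"
      · have hkBI : pk = "B" ∨ pk = "I" := h2.mpr hBI
        by_cases hpt : pt = some t <;> simp [hI, hO, hkO, hBI, hkBI, hpt]
      · have hkBI : ¬ (pk = "B" ∨ pk = "I") := fun h => hBI (h2.mp h)
        simp [hI, hO, hkO, hBI, hkBI]
  · have : ¬ (pstA = "O" ∧ st2 = "I") := fun h => hI h.2
    simp [hI]

-- main loop correspondence: A's fused loop equals emit ∘ repair ∘ classify, for every pair of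
-- related states (emit's prev = A's prev; repair's raw prev state agrees with A's on "O" and {B,I})
lemma loop_eq (col : Int) (s sep : String) :
    ∀ (vrt acc : List String) (pstA pk : String) (pt : Option String),
      Pre_repair_bio vrt col sep s →
      ((pk = "O") ↔ (pstA = "O")) → ((pk = "B" ∨ pk = "I") ↔ (pstA = "B" ∨ pstA = "I")) →
      repairBioLoop col s vrt acc pstA pt
        = emitRecs s (repairRecs col pk pt (classifyLines col s vrt)) acc pstA
  | [], acc, pstA, pk, pt, _, _, _ => by
    simp [repairBioLoop, classifyLines, repairRecs, emitRecs]
  | raw :: rest, acc, pstA, pk, pt, hPre, h1, h2 => by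
    have hPre' : Pre_repair_bio rest col sep s := fun l hl => hPre l (List.mem_cons_of_mem _ hl)
    rw [repairBioLoop, classifyLines]
    by_cases hskip : (PySem.Str.startswith (PySem.Str.strip raw) ("<" ++ s ++ " ")
        || PySem.Str.startswith (PySem.Str.strip raw) ("<" ++ s ++ ">")
        || PySem.Str.startswith (PySem.Str.strip raw) ("</" ++ s)) = true
    · simp only [hskip, if_true]
      exact loop_eq col s sep rest acc pstA pk pt hPre' h1 h2
    · simp only [Bool.not_eq_true] at hskip
      simp only [hskip, Bool.false_eq_true, if_false]
      by_cases hbrk : PySem.Str.startswith (PySem.Str.strip raw) "<" = true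
      · simp only [hbrk, if_true, repairRecs, emitRecs]
        rw [loop_eq col s sep rest _ "O" "O" none hPre' Iff.rfl Iff.rfl]
        simp
      · simp only [Bool.not_eq_true] at hbrk
        simp only [hbrk, Bool.false_eq_true, if_false]
        by_cases hO : PySem.List.pyGetD (pySplit (PySem.Str.strip raw) "\t") col "" = "O"
        · simp only [hO, if_true, repairRecs, emitRecs]
          rw [loop_eq col s sep rest _ "O" "O" none hPre' Iff.rfl Iff.rfl]
          simp
        · simp only [hO, if_false, repairRecs, emitRecs]
          -- token case
          set line := PySem.Str.strip raw with hline
          set cols := pySplit line "\t" with hcols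
          -- Pre_ on this line: kept as a p-attribute with a two-part encoding
          have hlen : (pySplit (PySem.List.pyGetD cols col "") "-").length = 2 := by
            rcases hPre raw (List.mem_cons_self ..) with h | h | h | h | ⟨_, h⟩
            · rw [← hline] at h; rw [h] at hskip; simp at hskip
            · rw [← hline] at h; rw [h] at hskip; simp at hskip
            · rw [← hline] at h; rw [h] at hskip; simp at hskip
            · rw [← hline, hbrk] at h; exact absurd h (by simp)
            · rw [← hline, ← hcols] at h; exact h.resolve_left hO
          obtain ⟨p0, p1, hparts⟩ : ∃ a b, pySplit (PySem.List.pyGetD cols col "") "-" = [a, b] := by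
            match hp : pySplit (PySem.List.pyGetD cols col "") "-", hlen' : hlen with
            | [a, b], _ => exact ⟨a, b, rfl⟩
          rw [hparts]
          simp only [List.getD_cons_zero, List.getD_cons_succ]
          set st0 := p0 with hst0
          set t := p1 with ht
          have hnorm : (if (if st0 = "S" then "B" else st0) = "E" then "I"
              else (if st0 = "S" then "B" else st0))
              = (if st0 = "S" then "B" else if st0 = "E" then "I" else st0) := by
            by_cases hS : st0 = "S" <;> simp [hS]
          set st2 := if st0 = "S" then "B" else if st0 = "E" then "I" else st0 with hst2
          rw [hnorm]
          rw [repair_state_eq pstA pk st2 t pt h1 h2]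
          set stF := if st2 = "I" ∧ (pk = "O" ∨ ((pk = "B" ∨ pk = "I") ∧ pt ≠ some t)) then "B" else st2
            with hstF
          have hclass : (st2 = "O") ↔ (stF = "O") := by
            rw [hstF]; split_ifs with h
            · simp [h.1]
            · exact Iff.rfl
          have hclass2 : (st2 = "B" ∨ st2 = "I") ↔ (stF = "B" ∨ stF = "I") := by
            rw [hstF]; split_ifs with h
            · simp [h.1]
            · exact Iff.rfl
          rw [loop_eq col s sep rest _ stF st2 (some t) hPre' hclass hclass2]
          by_cases hB : stF = "B"
          · simp [hB]
          · have hnoneq : (some t : Option String) ≠ none := by simp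
            by_cases hI : stF = "I" <;> simp [hB, hI, hnoneq]

-- ===== VERDICT (by name: the statement is the Claim_ definition above) =====
theorem repair_bio_spec : Claim_equal_repair_bio := by
  intro vrt col sep s _hDom hPre
  unfold Spec_repair_bio repair_bio repair_bio_alt
  exact loop_eq col s sep vrt [] "O" "O" none hPre Iff.rfl Iff.rfl
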